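-- pv_equiv track=rewrite | github.com/hellokena/Programmers | 코딩테스트 연습/Level 1/월간 코드 챌린지 시즌1_두 개 뽑아서 더하기.py | solution
-- ===== SOURCE A (Python) =====
-- def solution(numbers):
--     answer = []
--     for a,i in enumerate(numbers):
--         for b,j in enumerate(numbers):
--             if a == b:
--                 continue
--             answer.append(i+j)
--     answer = set(answer)
--     answer = list(answer)
--     answer = sorted(answer)
--     return answer
-- ===== SOURCE B (Python) =====
-- def distinct_pair_sums(vals):
--     # sums of two different values from a duplicate-free list, recursively
--     if not vals:
--         return set()
--     first, rest = vals[0], vals[1:]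
--     sums = distinct_pair_sums(rest)
--     for v in rest:
--         sums.add(first + v)
--     return sums
--
-- def solution(numbers):
--     counts = {}
--     for v in numbers:
--         counts[v] = counts.get(v, 0) + 1
--     sums = distinct_pair_sums(list(counts))
--     for v, c in counts.items():
--         if c >= 2:
--             sums.add(2 * v)
--     return sorted(sums)
-- ===== Notes on version B (the rewrite author's own statement) =====
-- stated objective: faster
-- what changed: Instead of scanning all ordered index pairs, B builds a value->count map once, generates sums over unordered pairs of distinct values plus 2*v for values with count >= 2, so cost depends on the number of distinct values, not list length squared.
import Mathlib
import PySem

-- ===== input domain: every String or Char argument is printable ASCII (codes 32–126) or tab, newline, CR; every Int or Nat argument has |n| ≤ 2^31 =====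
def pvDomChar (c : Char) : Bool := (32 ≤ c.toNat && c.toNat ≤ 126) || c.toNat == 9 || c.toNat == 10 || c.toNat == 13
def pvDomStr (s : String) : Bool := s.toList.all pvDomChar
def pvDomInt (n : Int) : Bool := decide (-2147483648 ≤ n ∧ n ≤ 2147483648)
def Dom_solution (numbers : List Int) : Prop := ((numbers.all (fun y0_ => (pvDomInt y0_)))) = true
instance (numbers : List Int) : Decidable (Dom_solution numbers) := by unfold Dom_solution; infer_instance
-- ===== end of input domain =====

-- B replaces A's scan over all ordered index pairs by a value->count map: sums of unordered
-- pairs of distinct values, plus 2*v for each value of count ≥ 2 (cost depends on distinct values).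

-- ===== PORT A =====
def solution (numbers : List Int) : List Int :=
  let answer : List Int :=
    (PySem.List.enumerate numbers 0).foldl (fun acc ai =>
      (PySem.List.enumerate numbers 0).foldl (fun acc2 bj =>
        if ai.1 == bj.1 then acc2 else acc2 ++ [ai.2 + bj.2]) acc) []
  PySem.List.sorted (PySem.Set.ofList answer) (fun x => x) false

-- ===== PORT B =====
def distinctPairSums : List Int → PySem.Set Int
  | [] => PySem.Set.empty
  | first :: rest => rest.foldl (fun s v => PySem.Set.add s (first + v)) (distinctPairSums rest)

def solution_alt (numbers : List Int) : List Int :=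
  let counts : PySem.Dict Int Int :=
    numbers.foldl (fun d v => d.insert v (d.getD v 0 + 1)) PySem.Dict.empty
  let sums := distinctPairSums counts.keys
  let sums2 := counts.items.foldl
    (fun s p => if p.2 ≥ 2 then PySem.Set.add s (2 * p.1) else s) sums
  PySem.List.sorted sums2 (fun x => x) false

-- ===== PRECONDITION & SPEC =====
def Spec_solution (numbers : List Int) (out : List Int) : Prop := out = solution_alt numbers
instance (numbers : List Int) (out : List Int) : Decidable (Spec_solution numbers out) := by unfold Spec_solution; infer_instance

-- ===== CLAIM (what is proved, stated in full; the proofs are below) =====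
def Claim_equal_solution : Prop := ∀ (numbers : List Int), Dom_solution numbers → Spec_solution numbers (solution numbers)

-- ===== LEMMAS AND PROOFS =====

-- A's inner loop membership
theorem mem_inner (l : List (Int × Int)) (a i x : Int) (acc : List Int) :
    x ∈ l.foldl (fun acc2 bj => if a == bj.1 then acc2 else acc2 ++ [i + bj.2]) acc ↔
      x ∈ acc ∨ ∃ q ∈ l, a ≠ q.1 ∧ x = i + q.2 := by
  induction l generalizing acc with
  | nil => simp
  | cons q t ih =>
    simp only [List.foldl_cons]
    by_cases h : a = q.1
    · rw [if_pos (beq_iff_eq.mpr h), ih]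
      constructor
      · rintro (h' | ⟨p, hp, hne, hx⟩)
        · exact Or.inl h'
        · exact Or.inr ⟨p, List.mem_cons_of_mem _ hp, hne, hx⟩
      · rintro (h' | ⟨p, hp, hne, hx⟩)
        · exact Or.inl h'
        · rcases List.mem_cons.mp hp with rfl | hp'
          · exact absurd h hne
          · exact Or.inr ⟨p, hp', hne, hx⟩
    · rw [if_neg (by simp [h]), ih]
      constructor
      · rintro (h' | ⟨p, hp, hne, hx⟩)
        · rcases List.mem_append.mp h' with h'' | h''
          · exact Or.inl h''
          · exact Or.inr ⟨q, List.mem_cons_self, h, by simpa using h''⟩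
        · exact Or.inr ⟨p, List.mem_cons_of_mem _ hp, hne, hx⟩
      · rintro (h' | ⟨p, hp, hne, hx⟩)
        · exact Or.inl (List.mem_append.mpr (Or.inl h'))
        · rcases List.mem_cons.mp hp with rfl | hp'
          · exact Or.inl (List.mem_append.mpr (Or.inr (by simp [hx])))
          · exact Or.inr ⟨p, hp', hne, hx⟩

-- A's outer loop membership
theorem mem_answer (l L : List (Int × Int)) (acc : List Int) (x : Int) :
    x ∈ l.foldl (fun acc ai =>
        L.foldl (fun acc2 bj => if ai.1 == bj.1 then acc2 else acc2 ++ [ai.2 + bj.2]) acc) acc ↔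
      x ∈ acc ∨ ∃ p ∈ l, ∃ q ∈ L, p.1 ≠ q.1 ∧ x = p.2 + q.2 := by
  induction l generalizing acc with
  | nil => simp
  | cons p t ih =>
    simp only [List.foldl_cons, ih, mem_inner]
    constructor
    · rintro ((h | ⟨q, hq, hne, hx⟩) | ⟨p', hp', q, hq, hne, hx⟩)
      · exact Or.inl h
      · exact Or.inr ⟨p, List.mem_cons_self, q, hq, hne, hx⟩
      · exact Or.inr ⟨p', List.mem_cons_of_mem _ hp', q, hq, hne, hx⟩
    · rintro (h | ⟨p', hp', q, hq, hne, hx⟩)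
      · exact Or.inl (Or.inl h)
      · rcases List.mem_cons.mp hp' with rfl | hp''
        · exact Or.inl (Or.inr ⟨q, hq, hne, hx⟩)
        · exact Or.inr ⟨p', hp'', q, hq, hne, hx⟩

-- membership through B's conditional-add loop
theorem mem_foldl_add_if {β : Type} (l : List β) (c : β → Prop) [DecidablePred c]
    (f : β → Int) (s0 : PySem.Set Int) (x : Int) :
    x ∈ l.foldl (fun s p => if c p then PySem.Set.add s (f p) else s) s0 ↔
      x ∈ s0 ∨ ∃ p ∈ l, c p ∧ x = f p := by
  induction l generalizing s0 with
  | nil => simp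
  | cons p t ih =>
    simp only [List.foldl_cons]
    by_cases h : c p
    · rw [if_pos h, ih]
      constructor
      · rintro (h' | ⟨p', hp', hc, hx⟩)
        · rcases (PySem.Set.mem_add _ _ _).mp h' with h'' | h''
          · exact Or.inl h''
          · exact Or.inr ⟨p, List.mem_cons_self, h, h''⟩
        · exact Or.inr ⟨p', List.mem_cons_of_mem _ hp', hc, hx⟩
      · rintro (h' | ⟨p', hp', hc, hx⟩)
        · exact Or.inl ((PySem.Set.mem_add _ _ _).mpr (Or.inl h'))
        · rcases List.mem_cons.mp hp' with rfl | hp''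
          · exact Or.inl ((PySem.Set.mem_add _ _ _).mpr (Or.inr hx))
          · exact Or.inr ⟨p', hp'', hc, hx⟩
    · rw [if_neg h, ih]
      constructor
      · rintro (h' | ⟨p', hp', hc, hx⟩)
        · exact Or.inl h'
        · exact Or.inr ⟨p', List.mem_cons_of_mem _ hp', hc, hx⟩
      · rintro (h' | ⟨p', hp', hc, hx⟩)
        · exact Or.inl h'
        · rcases List.mem_cons.mp hp' with rfl | hp''
          · exact absurd hc h
          · exact Or.inr ⟨p', hp'', hc, hx⟩

theorem nodup_foldl_add_if {β : Type} (l : List β) (c : β → Prop) [DecidablePred c]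
    (f : β → Int) (s0 : PySem.Set Int) (h : s0.Nodup) :
    (l.foldl (fun s p => if c p then PySem.Set.add s (f p) else s) s0).Nodup := by
  induction l generalizing s0 with
  | nil => simpa
  | cons p t ih =>
    simp only [List.foldl_cons]
    split
    · exact ih _ (PySem.Set.nodup_add _ _ h)
    · exact ih _ h

theorem nodup_foldl_add (l : List Int) (f : Int → Int) (s0 : PySem.Set Int) (h : s0.Nodup) :
    (l.foldl (fun s v => PySem.Set.add s (f v)) s0).Nodup := by
  induction l generalizing s0 with
  | nil => simpa
  | cons v t ih =>
    simp only [List.foldl_cons]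
    exact ih _ (PySem.Set.nodup_add _ _ h)

theorem nodup_distinctPairSums (vs : List Int) : (distinctPairSums vs).Nodup := by
  induction vs with
  | nil => simp [distinctPairSums, PySem.Set.empty]
  | cons v t ih => exact nodup_foldl_add _ _ _ ih

theorem mem_distinctPairSums (vs : List Int) (h : vs.Nodup) (x : Int) :
    x ∈ distinctPairSums vs ↔ ∃ v1 ∈ vs, ∃ v2 ∈ vs, v1 ≠ v2 ∧ x = v1 + v2 := by
  induction vs with
  | nil => simp [distinctPairSums, PySem.Set.empty]
  | cons v t ih =>
    have hvt : v ∉ t := (List.nodup_cons.mp h).1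
    have ht : t.Nodup := (List.nodup_cons.mp h).2
    simp only [distinctPairSums, PySem.Set.mem_foldl_add, ih ht, List.mem_cons]
    constructor
    · rintro (⟨v1, hv1, v2, hv2, hne, hx⟩ | ⟨w, hw, hx⟩)
      · exact ⟨v1, Or.inr hv1, v2, Or.inr hv2, hne, hx⟩
      · exact ⟨v, Or.inl rfl, w, Or.inr hw, fun he => hvt (he ▸ hw), hx⟩
    · rintro ⟨v1, hv1 | hv1, v2, hv2 | hv2, hne, hx⟩
      · subst hv1; subst hv2; exact absurd rfl hne
      · subst hv1; exact Or.inr ⟨v2, hv2, hx⟩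
      · subst hv2; exact Or.inr ⟨v1, hv1, by omega⟩
      · exact Or.inl ⟨v1, hv1, v2, hv2, hne, hx⟩

-- two distinct equal-valued positions give count ≥ 2
theorem two_le_count_of_getElem (l : List Int) :
    ∀ (k m : Nat) (hk : k < l.length) (hm : m < l.length), k ≠ m → l[k] = l[m] →
      2 ≤ l.count l[k] := by
  induction l with
  | nil => intro k m hk; simp at hk
  | cons a t ih =>
    intro k m hk hm hne heq
    match k, m with
    | 0, 0 => exact absurd rfl hne
    | 0, m + 1 =>
      have hm' : m < t.length := by simpa using hm
      simp only [List.getElem_cons_zero, List.getElem_cons_succ] at heq ⊢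
      have hmem : a ∈ t := heq ▸ List.getElem_mem hm'
      have h1 : 1 ≤ t.count a := List.one_le_count_iff.mpr hmem
      rw [List.count_cons_self]; omega
    | k + 1, 0 =>
      have hk' : k < t.length := by simpa using hk
      simp only [List.getElem_cons_succ, List.getElem_cons_zero] at heq ⊢
      rw [heq, List.count_cons_self]
      have hmem : a ∈ t := heq ▸ List.getElem_mem hk'
      have h1 : 1 ≤ t.count a := List.one_le_count_iff.mpr hmem
      omega
    | k + 1, m + 1 =>
      have hk' : k < t.length := by simpa using hk
      have hm' : m < t.length := by simpa using hm
      simp only [List.getElem_cons_succ] at heq ⊢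
      have h2 := ih k m hk' hm' (by omega) heq
      exact le_trans h2 ((List.sublist_cons_self a t).count_le _)

theorem exists_getElem_of_two_le_count (l : List Int) (v : Int) :
    2 ≤ l.count v →
      ∃ (k m : Nat) (hk : k < l.length) (hm : m < l.length), k ≠ m ∧ l[k] = v ∧ l[m] = v := by
  induction l with
  | nil => simp
  | cons a t ih =>
    intro h
    by_cases ha : a = v
    · subst ha
      have h1 : 1 ≤ t.count a := by rw [List.count_cons_self] at h; omega
      obtain ⟨m, hm, hmv⟩ := List.mem_iff_getElem.mp (List.one_le_count_iff.mp h1)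
      exact ⟨0, m + 1, by simp, by simpa using Nat.succ_lt_succ hm, by omega, rfl, by simpa using hmv⟩
    · have h2 : 2 ≤ t.count v := by rwa [List.count_cons_of_ne ha] at h
      obtain ⟨k, m, hk, hm, hne, h1, h2'⟩ := ih h2
      exact ⟨k + 1, m + 1, by simpa using Nat.succ_lt_succ hk,
        by simpa using Nat.succ_lt_succ hm, by omega, by simpa using h1, by simpa using h2'⟩

-- bridge: index pairs ↔ value pairs / doubled duplicates
theorem bridge (numbers : List Int) (x : Int) :
    (∃ (k : Nat), ∃ (hk : k < numbers.length), ∃ (m : Nat), ∃ (hm : m < numbers.length),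
        k ≠ m ∧ x = numbers[k] + numbers[m]) ↔
      ((∃ v1 ∈ numbers, ∃ v2 ∈ numbers, v1 ≠ v2 ∧ x = v1 + v2) ∨
        ∃ v ∈ numbers, 2 ≤ numbers.count v ∧ x = 2 * v) := by
  constructor
  · rintro ⟨k, hk, m, hm, hne, hx⟩
    by_cases hv : numbers[k] = numbers[m]
    · refine Or.inr ⟨numbers[k], List.getElem_mem hk,
        two_le_count_of_getElem numbers k m hk hm hne hv, by omega⟩
    · exact Or.inl ⟨numbers[k], List.getElem_mem hk, numbers[m], List.getElem_mem hm, hv, hx⟩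
  · rintro (⟨v1, hv1, v2, hv2, hne, hx⟩ | ⟨v, hv, hc, hx⟩)
    · obtain ⟨k, hk, hkv⟩ := List.mem_iff_getElem.mp hv1
      obtain ⟨m, hm, hmv⟩ := List.mem_iff_getElem.mp hv2
      refine ⟨k, hk, m, hm, fun he => hne ?_, by rw [hkv, hmv]; exact hx⟩
      subst he
      rw [← hkv, ← hmv]
    · obtain ⟨k, m, hk, hm, hne, h1, h2⟩ := exists_getElem_of_two_le_count numbers v hc
      exact ⟨k, hk, m, hm, hne, by rw [h1, h2]; omega⟩

-- ===== VERDICT (by name: the statement is the Claim_ definition above) =====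
theorem solution_spec : Claim_equal_solution := by
  intro numbers _
  unfold Spec_solution solution solution_alt
  simp only []
  have hcounter : numbers.foldl (fun d v => d.insert v (d.getD v 0 + 1))
      (PySem.Dict.empty : PySem.Dict Int Int) = PySem.Dict.counter numbers :=
    PySem.Dict.foldl_insert_getD_add_one_eq_counter numbers
  rw [hcounter, PySem.Dict.keys_counter, PySem.Dict.items_counter]
  set SB := ((PySem.Set.ofList numbers).map (fun k => (k, (numbers.count k : Int)))).foldl
      (fun s p => if p.2 ≥ 2 then PySem.Set.add s (2 * p.1) else s)
      (distinctPairSums (PySem.Set.ofList numbers)) with hSB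
  set SA := PySem.Set.ofList
    ((PySem.List.enumerate numbers 0).foldl (fun acc ai =>
      (PySem.List.enumerate numbers 0).foldl (fun acc2 bj =>
        if ai.1 == bj.1 then acc2 else acc2 ++ [ai.2 + bj.2]) acc) []) with hSA
  have hperm : SA.Perm SB := by
    rw [List.perm_ext_iff_of_nodup (hSA ▸ PySem.Set.nodup_ofList _)
      (hSB ▸ nodup_foldl_add_if _ _ _ _ (nodup_distinctPairSums _))]
    intro x
    rw [hSA, hSB, PySem.Set.mem_ofList, mem_answer, mem_foldl_add_if,
      mem_distinctPairSums _ (PySem.Set.nodup_ofList numbers)]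
    simp only [List.not_mem_nil, false_or, PySem.List.mem_enumerate_iff, PySem.Set.mem_ofList,
      List.mem_map]
    constructor
    · rintro ⟨p, ⟨k, hk, hp⟩, q, ⟨m, hm, hq⟩, hne, hx⟩
      subst hp; subst hq
      simp only [zero_add] at hne hx
      have hkm : k ≠ m := fun he => hne (by simp [he])
      rcases (bridge numbers x).mp ⟨k, hk, m, hm, hkm, hx⟩ with h | ⟨v, hv, hc, hx'⟩
      · exact Or.inl h
      · exact Or.inr ⟨(v, (numbers.count v : Int)), ⟨v, hv, rfl⟩, by simpa using hc, by simpa using hx'⟩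
    · rintro (h | ⟨p, ⟨v, hv, hp⟩, hc, hx⟩)
      · obtain ⟨k, hk, m, hm, hkm, hx⟩ := (bridge numbers x).mpr (Or.inl h)
        exact ⟨(k, numbers[k]), ⟨k, hk, by simp⟩, (m, numbers[m]), ⟨m, hm, by simp⟩,
          by simpa using hkm, hx⟩
      · subst hp
        simp only at hc hx
        obtain ⟨k, hk, m, hm, hkm, hx'⟩ := (bridge numbers x).mpr
          (Or.inr ⟨v, hv, by exact_mod_cast hc, by omega⟩)
        exact ⟨(k, numbers[k]), ⟨k, hk, by simp⟩, (m, numbers[m]), ⟨m, hm, by simp⟩,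
          by simpa using hkm, hx'⟩
  exact PySem.List.sorted_eq_sorted_of_perm _ _ _ (fun a b h => h) hperm
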